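-- pv_equiv track=rewrite | github.com/DMOJ/libmemcpy | generate.py | get_ambles
-- ===== SOURCE A (Python) =====
-- def get_ambles(f, comment, name):
--     state = 0
--     begin = f'{comment} BEGIN {name}'
--     end = f'{comment} END {name}'
--     preamble = []
--     postamble = []
--
--     for line in f:
--         if state == 0:
--             if begin in line:
--                 state = 1
--             preamble.append(line)
--         elif state == 1:
--             if end in line:
--                 state = 2
--                 postamble.append(line)
--         else:
--             postamble.append(line)
--
--     return preamble, postamble
-- ===== SOURCE B (Python) =====
-- def get_ambles(f, comment, name):
--     lines = list(f)
--     begin = f'{comment} BEGIN {name}'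
--     end = f'{comment} END {name}'
--     i = next((k for k, line in enumerate(lines) if begin in line), None)
--     if i is None:
--         return lines, []
--     tail = lines[i + 1:]
--     j = next((k for k, line in enumerate(tail) if end in line), None)
--     return lines[:i + 1], (tail[j:] if j is not None else [])
-- ===== Notes on version B (the rewrite author's own statement) =====
-- stated objective: simpler
-- what changed: Replaces the three-state accumulating pass with locate-the-two-markers-then-slice: find the first BEGIN line, find the first END line strictly after it, and return the corresponding prefix and suffix slices.
import Mathlib
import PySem

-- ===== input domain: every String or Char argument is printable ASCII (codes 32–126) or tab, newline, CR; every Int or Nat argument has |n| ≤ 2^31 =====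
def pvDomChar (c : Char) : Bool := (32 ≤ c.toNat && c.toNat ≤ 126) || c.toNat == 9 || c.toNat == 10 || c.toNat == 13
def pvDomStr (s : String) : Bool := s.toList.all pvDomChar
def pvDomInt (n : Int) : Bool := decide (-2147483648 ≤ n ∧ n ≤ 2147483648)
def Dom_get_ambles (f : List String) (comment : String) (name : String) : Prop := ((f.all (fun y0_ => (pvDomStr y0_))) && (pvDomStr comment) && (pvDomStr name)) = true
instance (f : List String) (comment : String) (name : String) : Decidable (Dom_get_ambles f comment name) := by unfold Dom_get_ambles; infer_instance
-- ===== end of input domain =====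

-- B replaces A's three-state accumulating pass with locate-markers-then-slice (simpler decomposition).

-- ===== PORT A =====
-- A's for-loop over f with state/preamble/postamble, transcribed as structural recursion on f.
def getAmblesLoopA (pb pe : String → Bool) : List String → Nat → List String → List String → List String × List String
  | [], _, pre, post => (pre, post)
  | line :: rest, state, pre, post =>
    if state = 0 then
      getAmblesLoopA pb pe rest (if pb line then 1 else 0) (pre ++ [line]) post
    else if state = 1 then
      if pe line then getAmblesLoopA pb pe rest 2 pre (post ++ [line])
      else getAmblesLoopA pb pe rest 1 pre post
    else
      getAmblesLoopA pb pe rest state pre (post ++ [line])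

def get_ambles (f : List String) (comment : String) (name : String) : List String × List String :=
  let beginMark := comment ++ " BEGIN " ++ name
  let endMark := comment ++ " END " ++ name
  getAmblesLoopA (fun line => PySem.Str.isIn beginMark line) (fun line => PySem.Str.isIn endMark line) f 0 [] []

-- ===== PORT B =====
-- next(… enumerate …) = List.findIdx?; the slices lines[:i+1] / lines[i+1:] / tail[j:] with
-- nonnegative in-range bounds are exactly List.take / List.drop.
def get_ambles_alt (f : List String) (comment : String) (name : String) : List String × List String :=
  let beginMark := comment ++ " BEGIN " ++ name
  let endMark := comment ++ " END " ++ name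
  match f.findIdx? (fun line => PySem.Str.isIn beginMark line) with
  | none => (f, [])
  | some i =>
    let tail := f.drop (i + 1)
    match tail.findIdx? (fun line => PySem.Str.isIn endMark line) with
    | none => (f.take (i + 1), [])
    | some j => (f.take (i + 1), tail.drop j)

-- ===== PRECONDITION & SPEC =====
def Spec_get_ambles (f : List String) (comment : String) (name : String) (out : List String × List String) : Prop := out = get_ambles_alt f comment name
instance (f : List String) (comment : String) (name : String) (out : List String × List String) : Decidable (Spec_get_ambles f comment name out) := by unfold Spec_get_ambles; infer_instance

-- ===== CLAIM (what is proved, stated in full; the proofs are below) =====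
def Claim_equal_get_ambles : Prop := ∀ (f : List String) (comment : String) (name : String), Dom_get_ambles f comment name → Spec_get_ambles f comment name (get_ambles f comment name)

-- ===== LEMMAS AND PROOFS =====

-- state 2: the rest of the file is appended to postamble
theorem loopA_state2 (pb pe : String → Bool) (f : List String) (pre post : List String) :
    getAmblesLoopA pb pe f 2 pre post = (pre, post ++ f) := by
  induction f generalizing post with
  | nil => simp [getAmblesLoopA]
  | cons line rest ih => simp [getAmblesLoopA, ih]

-- state 1: postamble gains the suffix from the first END match, if any
theorem loopA_state1 (pb pe : String → Bool) (f : List String) (pre post : List String) :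
    getAmblesLoopA pb pe f 1 pre post =
      (pre, post ++ (match f.findIdx? pe with | none => [] | some j => f.drop j)) := by
  induction f generalizing post with
  | nil => simp [getAmblesLoopA]
  | cons line rest ih =>
    by_cases h : pe line
    · simp [getAmblesLoopA, h, loopA_state2, List.findIdx?_cons]
    · simp only [getAmblesLoopA, if_neg (by decide : ¬ (1 = 0)), ih,
        List.findIdx?_cons, h, Bool.false_eq_true, if_false]
      cases rest.findIdx? pe <;> simp

-- state 0: full characterisation matching B's locate-then-slice form
theorem loopA_state0 (pb pe : String → Bool) (f : List String) (pre post : List String) :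
    getAmblesLoopA pb pe f 0 pre post =
      (match f.findIdx? pb with
       | none => (pre ++ f, post)
       | some i =>
         (pre ++ f.take (i + 1),
          post ++ (match (f.drop (i + 1)).findIdx? pe with
                   | none => [] | some j => (f.drop (i + 1)).drop j))) := by
  induction f generalizing pre with
  | nil => simp [getAmblesLoopA]
  | cons line rest ih =>
    by_cases h : pb line
    · simp [getAmblesLoopA, h, loopA_state1, List.findIdx?_cons]
    · simp only [getAmblesLoopA, h, Bool.false_eq_true, if_false, ih,
        List.findIdx?_cons]
      cases rest.findIdx? pb <;> simp

-- ===== VERDICT (by name: the statement is the Claim_ definition above) =====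
theorem get_ambles_spec : Claim_equal_get_ambles := by
  intro f comment name _
  unfold Spec_get_ambles get_ambles get_ambles_alt
  simp only [loopA_state0, List.nil_append]
  cases f.findIdx? (fun line => PySem.Str.isIn (comment ++ " BEGIN " ++ name) line) with
  | none => rfl
  | some i =>
    rcases h2 : (f.drop (i + 1)).findIdx? (fun line => PySem.Str.isIn (comment ++ " END " ++ name) line) <;>
      simp only [h2]
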